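-- pv_equiv track=rewrite | github.com/MoncefTayouub/zineb_book_store_backend_app | app/Manipulation.py | setUsername
-- ===== SOURCE A (Python) =====
-- def setUsername (username) :
--     arr = username.split(' ')
--     firstName = arr[0]
--     secondName = ''
--     if len(arr) > 1  :
--         for k in range(1 , len(arr)) :
--             secondName += ' ' + arr[k]
--     return [firstName , secondName]
-- ===== SOURCE B (Python) =====
-- def setUsername(username):
--     first, sep, rest = username.partition(' ')
--     return [first, sep + rest]
-- ===== Notes on version B (the rewrite author's own statement) =====
-- stated objective: idiomatic
-- what changed: Replaces split(' ') plus an index loop that re-accumulates the remainder with a single str.partition(' ') call returning the first word and the space-prefixed remainder directly.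
import Mathlib
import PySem

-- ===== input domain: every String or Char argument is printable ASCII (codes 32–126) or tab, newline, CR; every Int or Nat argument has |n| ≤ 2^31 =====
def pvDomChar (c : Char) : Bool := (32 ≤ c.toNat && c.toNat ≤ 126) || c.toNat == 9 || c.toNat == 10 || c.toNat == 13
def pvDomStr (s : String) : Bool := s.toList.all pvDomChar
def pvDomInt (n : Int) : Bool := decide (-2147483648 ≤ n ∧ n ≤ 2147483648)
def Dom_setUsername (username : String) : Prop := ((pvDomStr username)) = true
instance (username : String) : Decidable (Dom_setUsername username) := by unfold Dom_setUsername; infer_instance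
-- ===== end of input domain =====

-- B replaces A's split(' ')-then-reaccumulate index loop with a single partition-style scan (idiomatic str.partition); same cost.

-- ===== PORT A =====
def setUsername (username : String) : List String :=
  let arr := PySem.Chars.splitOn username.toList [' ']
  let firstName := PySem.List.pyGetD arr 0 []
  let secondName :=
    if arr.length > 1 then
      (PySem.List.pyRange 1 (arr.length : Int) 1).foldl
        (fun s k => s ++ ' ' :: PySem.List.pyGetD arr k []) []
    else []
  [String.ofList firstName, String.ofList secondName]

-- ===== PORT B =====
-- hand port of str.partition(' ') (single-char separator): exact here — scans to the
-- first space and returns (before, sep, after); sep = [' '] iff a space occurs.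
def part3 : List Char → List Char × List Char × List Char
  | [] => ([], [], [])
  | c :: cs =>
    if c = ' ' then ([], [' '], cs)
    else
      let t := part3 cs
      (c :: t.1, t.2.1, t.2.2)

def setUsername_alt (username : String) : List String :=
  let t := part3 username.toList
  [String.ofList t.1, String.ofList (t.2.1 ++ t.2.2)]

-- ===== PRECONDITION & SPEC =====
def Spec_setUsername (username : String) (out : List String) : Prop := out = setUsername_alt username
instance (username : String) (out : List String) : Decidable (Spec_setUsername username out) := by unfold Spec_setUsername; infer_instance

-- ===== CLAIM (what is proved, stated in full; the proofs are below) =====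
def Claim_equal_setUsername : Prop := ∀ (username : String), Dom_setUsername username → Spec_setUsername username (setUsername username)

-- ===== LEMMAS AND PROOFS =====

-- structural model of splitOn on the single-char separator ' ':
-- spl cs = (first piece, remaining pieces)
def spl : List Char → List Char × List (List Char)
  | [] => ([], [])
  | c :: cs =>
    let t := spl cs
    if c = ' ' then ([], t.1 :: t.2) else (c :: t.1, t.2)

theorem spl_go (fuel : Nat) : ∀ (cs cur : List Char) (acc : List (List Char)),
    cs.length ≤ fuel →
    PySem.Chars.splitOn.go [' '] fuel cs cur acc
      = acc.reverse ++ (cur.reverse ++ (spl cs).1) :: (spl cs).2 := by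
  induction fuel with
  | zero =>
    intro cs cur acc h
    have : cs = [] := List.eq_nil_of_length_eq_zero (Nat.le_zero.mp h)
    subst this
    rw [PySem.Chars.splitOn.go.eq_def]
    simp [spl]
  | succ n ih =>
    intro cs cur acc h
    cases cs with
    | nil =>
      rw [PySem.Chars.splitOn.go.eq_def]
      simp [spl]
    | cons c rest =>
      rw [PySem.Chars.splitOn.go.eq_def]
      simp only [List.isPrefixOf, Bool.and_true]
      by_cases hc : c = ' '
      · subst hc
        simp only [beq_self_eq_true, if_pos, List.length_cons, List.length_nil,
          List.drop_succ_cons, List.drop_zero]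
        rw [ih rest [] (cur.reverse :: acc) (by simp at h; omega)]
        simp [spl]
      · have : (' ' == c) = false := beq_eq_false_iff_ne.mpr (Ne.symm hc)
        simp only [this, Bool.false_eq_true, if_neg, not_false_iff]
        rw [ih rest (c :: cur) acc (by simp at h; omega)]
        simp [spl, hc]

theorem splitOn_space (cs : List Char) :
    PySem.Chars.splitOn cs [' '] = (spl cs).1 :: (spl cs).2 := by
  have := spl_go (cs.length + 1) cs [] [] (by omega)
  simpa [PySem.Chars.splitOn] using this

theorem spl_fst (cs : List Char) : (spl cs).1 = (part3 cs).1 := by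
  induction cs with
  | nil => simp [spl, part3]
  | cons c rest ih =>
    by_cases hc : c = ' ' <;> simp [spl, part3, hc, ih]

theorem spl_flatten (cs : List Char) :
    (spl cs).1 ++ (((spl cs).2.map (fun p => ' ' :: p)).flatten) = cs := by
  induction cs with
  | nil => simp [spl]
  | cons c rest ih =>
    by_cases hc : c = ' '
    · subst hc; simp [spl, ih]
    · simp [spl, hc, ih]

theorem spl_snd (cs : List Char) :
    (((spl cs).2.map (fun p => ' ' :: p)).flatten) = (part3 cs).2.1 ++ (part3 cs).2.2 := by
  induction cs with
  | nil => simp [spl, part3]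
  | cons c rest ih =>
    by_cases hc : c = ' '
    · subst hc
      simp [spl, part3, spl_flatten rest]
    · simp [spl, part3, hc, ih]

theorem foldl_app_space (l : List (List Char)) (init : List Char) :
    l.foldl (fun s p => s ++ ' ' :: p) init = init ++ ((l.map (fun p => ' ' :: p)).flatten) := by
  induction l generalizing init with
  | nil => simp
  | cons p ps ih => simp [ih]

-- ===== VERDICT (by name: the statement is the Claim_ definition above) =====
theorem setUsername_spec : Claim_equal_setUsername := by
  intro username _
  unfold Spec_setUsername setUsername setUsername_alt
  simp only [splitOn_space]
  set cs := username.toList with hcs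
  set h := (spl cs).1
  set t := (spl cs).2
  have hfst : PySem.List.pyGetD (h :: t) 0 [] = h := PySem.List.pyGetD_zero_cons _ _ _
  rw [hfst]
  by_cases hlen : (h :: t).length > 1
  · rw [if_pos hlen]
    have := PySem.List.foldl_pyRange_pyGetD' (a := 1) (xs := h :: t) (d := ([] : List Char))
      (f := fun s p => s ++ ' ' :: p) (init := ([] : List Char)) (by omega)
    rw [this]
    simp only [Int.toNat_one, List.drop_succ_cons, List.drop_zero]
    rw [foldl_app_space]
    simp [h, t, spl_fst, spl_snd]
  · rw [if_neg hlen]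
    have ht : t = [] := by
      simp only [List.length_cons, gt_iff_lt, not_lt] at hlen
      exact List.eq_nil_of_length_eq_zero (by omega)
    have h2 : (part3 cs).2.1 ++ (part3 cs).2.2 = [] := by
      rw [← spl_snd, show (spl cs).2 = [] from ht]; simp
    simp [spl_fst, h2, h]
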